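-- pv_equiv track=rewrite | github.com/Bobcatsoap/jy-server | cell/RoomType6PassiveFindCards.py | find_san_dai_yi
-- ===== SOURCE A (Python) =====
-- import copy
--
-- def find_san_dai_yi(target_cards):
--     three = []
--     target_cards.sort()
--     # 找到所有三张
--     for i in target_cards:
--         if target_cards.count(i) >= 3:
--             if i not in three:
--                 three.append(i)
--     san_dai_yi_s = []
--     for i in three:
--         temp = copy.deepcopy(target_cards)
--         for count in range(0, 3):
--             temp.remove(i)
--         for yi in temp:
--             if yi != i:
--                 san_dai_yi = [i, i, i, yi]
--                 if san_dai_yi not in san_dai_yi_s: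
--                     san_dai_yi_s.append(san_dai_yi)
--     return san_dai_yi_s
-- ===== SOURCE B (Python) =====
-- def find_san_dai_yi(target_cards):
--     target_cards.sort()  # same in-place sort side effect as the original
--     counts = {}
--     for c in target_cards:
--         counts[c] = counts.get(c, 0) + 1
--     vals = list(counts)  # distinct values, ascending (input is sorted)
--     return [[v, v, v, w] for v in vals if counts[v] >= 3 for w in vals if w != v]
-- ===== Notes on version B (the rewrite author's own statement) =====
-- stated objective: faster
-- what changed: Replaces A's quadratic scans (list.count per element, deepcopy+remove per triple, membership dedup of the output) with one counting-dict pass over the sorted input and a direct double loop over the distinct values, building each combination exactly once.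
import Mathlib
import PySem

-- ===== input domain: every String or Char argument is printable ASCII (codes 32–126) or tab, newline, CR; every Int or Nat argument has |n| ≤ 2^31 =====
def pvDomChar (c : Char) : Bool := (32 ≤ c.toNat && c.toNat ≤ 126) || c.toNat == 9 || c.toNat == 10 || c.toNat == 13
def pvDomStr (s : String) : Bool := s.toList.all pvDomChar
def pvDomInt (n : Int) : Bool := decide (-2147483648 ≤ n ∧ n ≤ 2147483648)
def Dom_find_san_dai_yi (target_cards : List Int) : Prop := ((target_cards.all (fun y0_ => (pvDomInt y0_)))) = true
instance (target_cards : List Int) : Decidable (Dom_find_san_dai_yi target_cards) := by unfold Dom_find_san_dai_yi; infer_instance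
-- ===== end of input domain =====

-- B replaces A's quadratic count/remove/membership scans with one counting pass and a double loop
-- over the distinct values (objective: faster). Both Pythons sort the argument in place (same side
-- effect); the equivalence proved here is about the return value.

-- ===== PORT A =====
-- literal transliteration of Source A: sort; collect values with count >= 3 (deduplicated);
-- for each such value remove three copies and pair with every remaining different card,
-- deduplicating the 4-card combos by membership.
def find_san_dai_yi (target_cards : List Int) : List (List Int) :=
  let tc := PySem.List.sorted target_cards (fun x => x) false
  let three := tc.foldl (fun acc i =>
      if PySem.List.count tc i ≥ 3 then
        (if i ∈ acc then acc else acc ++ [i])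
      else acc) []
  three.foldl (fun sds i =>
      -- temp = deepcopy(tc); for count in range(0, 3): temp.remove(i)
      -- (i has count ≥ 3 in tc, so temp.remove(i) never raises; getD is the unreachable branch)
      let temp := (PySem.List.pyRange 0 3 1).foldl
          (fun t _ => (PySem.List.remove? t i).getD t) tc
      temp.foldl (fun sds yi =>
        if yi ≠ i then
          (if [i, i, i, yi] ∈ sds then sds else sds ++ [[i, i, i, yi]])
        else sds) sds) []

-- ===== PORT B =====
-- literal transliteration of Source B: sort; one counting-dict pass; comprehension over the
-- distinct values (dict keys, ascending since the input was sorted).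
def find_san_dai_yi_alt (target_cards : List Int) : List (List Int) :=
  let tc := PySem.List.sorted target_cards (fun x => x) false
  let counts := tc.foldl (fun d c => d.insert c (d.getD c 0 + 1))
      (PySem.Dict.empty : PySem.Dict Int Int)
  let vals := counts.keys
  (vals.filter (fun v => decide (counts.getD v 0 ≥ 3))).flatMap
    (fun v => (vals.filter (fun w => decide (w ≠ v))).map (fun w => [v, v, v, w]))

-- ===== PRECONDITION & SPEC =====
def Spec_find_san_dai_yi (target_cards : List Int) (out : List (List Int)) : Prop := out = find_san_dai_yi_alt target_cards
instance (target_cards : List Int) (out : List (List Int)) : Decidable (Spec_find_san_dai_yi target_cards out) := by unfold Spec_find_san_dai_yi; infer_instance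

-- ===== CLAIM (what is proved, stated in full; the proofs are below) =====
def Claim_equal_find_san_dai_yi : Prop := ∀ (target_cards : List Int), Dom_find_san_dai_yi target_cards → Spec_find_san_dai_yi target_cards (find_san_dai_yi target_cards)

-- ===== LEMMAS AND PROOFS =====

-- set(filter) = filter(set): PySem.Set.ofList commutes with List.filter
theorem pv_ofList_filter {α : Type} [BEq α] [LawfulBEq α] (p : α → Bool) (xs : List α) :
    PySem.Set.ofList (xs.filter p) = (PySem.Set.ofList xs).filter p := by
  induction xs with
  | nil => rfl
  | cons x t ih =>
    by_cases hp : p x = true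
    · rw [List.filter_cons_of_pos hp, PySem.Set.ofList_cons, PySem.Set.ofList_cons, ih,
        List.filter_cons_of_pos hp]
      congr 1
      simp only [PySem.Set.discard]
      exact List.filter_comm _ _ _
    · rw [List.filter_cons_of_neg (by simpa using hp), PySem.Set.ofList_cons, ih,
        List.filter_cons_of_neg (by simpa using hp)]
      simp only [PySem.Set.discard]
      rw [List.filter_comm]
      have : ∀ y ∈ List.filter p (PySem.Set.ofList t), (!(y == x)) = true := by
        intro y hy
        have hpy := List.of_mem_filter hy
        simp only [Bool.not_eq_true', beq_eq_false_iff_ne]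
        rintro rfl; simp [hp] at hpy
      exact (List.filter_eq_self.mpr this).symm

-- set(map f) = map f (set) for injective f
theorem pv_ofList_map {α β : Type} [BEq α] [LawfulBEq α] [BEq β] [LawfulBEq β]
    (f : α → β) (hf : Function.Injective f) (xs : List α) :
    PySem.Set.ofList (xs.map f) = (PySem.Set.ofList xs).map f := by
  induction xs with
  | nil => rfl
  | cons x t ih =>
    rw [List.map_cons, PySem.Set.ofList_cons, PySem.Set.ofList_cons, ih]
    simp only [List.map_cons, PySem.Set.discard]
    rw [List.filter_map]
    congr 1
    exact congrArg (List.map f) (List.filter_congr (fun y _ => by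
      simp [hf.eq_iff]))

-- removing one occurrence of v does not change the elements different from v
theorem pv_remove_filter (l : List Int) (v : Int) :
    ((PySem.List.remove? l v).getD l).filter (fun y => decide (y ≠ v)) =
      l.filter (fun y => decide (y ≠ v)) := by
  induction l with
  | nil => rfl
  | cons x t ih =>
    by_cases hx : x = v
    · subst hx
      rw [PySem.List.remove?_cons_self]
      simp
    · rw [PySem.List.remove?_cons_of_ne t hx]
      cases hrem : PySem.List.remove? t v with
      | none => simp
      | some r =>
        rw [hrem] at ih
        simp only [Option.map_some, Option.getD_some] at ih ⊢
        simp only [List.filter_cons, ih]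

-- A's per-triple working list: tc with three copies of i removed
def pvRemove3 (tc : List Int) (i : Int) : List Int :=
  (PySem.List.pyRange 0 3 1).foldl (fun t _ => (PySem.List.remove? t i).getD t) tc

theorem pv_remove3_filter (tc : List Int) (i : Int) :
    (pvRemove3 tc i).filter (fun y => decide (y ≠ i)) = tc.filter (fun y => decide (y ≠ i)) := by
  have hr : PySem.List.pyRange 0 3 1 = [0, 1, 2] := by decide
  simp only [pvRemove3, hr, List.foldl_cons, List.foldl_nil]
  rw [pv_remove_filter, pv_remove_filter, pv_remove_filter]

-- the per-triple block A appends (deduplicated, as a set)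
def pvG (tc : List Int) (i : Int) : List (List Int) :=
  ((pvRemove3 tc i).filter (fun yi => decide (yi ≠ i))).map (fun yi => [i, i, i, yi])

-- a fold of set-updates whose blocks carry their own value in the head appends the blocks in order
theorem pv_foldl_update (G : Int → List (List Int)) :
    ∀ (ts : List Int) (sds : List (List Int)), ts.Nodup →
      (∀ i ∈ ts, ∀ z ∈ G i, z.head? = some i) →
      (∀ i ∈ ts, ∀ z ∈ G i, z ∉ sds) →
      ts.foldl (fun sds i => PySem.Set.update sds (G i)) sds =
        sds ++ ts.flatMap (fun i => PySem.Set.ofList (G i)) := by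
  intro ts
  induction ts with
  | nil => intro sds _ _ _; simp
  | cons i0 t ih =>
    intro sds hnd hhead hfresh
    rw [List.foldl_cons]
    have hupd : PySem.Set.update sds (G i0) = sds ++ PySem.Set.ofList (G i0) := by
      rw [PySem.Set.update_eq_append_filter]
      congr 1
      apply List.filter_eq_self.mpr
      intro z hz
      have hz' : z ∈ G i0 := (PySem.Set.mem_ofList _ _).mp hz
      have : z ∉ sds := hfresh i0 (by simp) z hz'
      simpa [PySem.Set.contains_iff] using this
    rw [hupd]
    rw [ih (sds ++ PySem.Set.ofList (G i0)) hnd.of_cons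
      (fun i hi z hz => hhead i (by simp [hi]) z hz)
      (fun i hi z hz => by
        intro hmem
        rcases List.mem_append.mp hmem with h | h
        · exact hfresh i (by simp [hi]) z hz h
        · have h1 : z.head? = some i := hhead i (by simp [hi]) z hz
          have h2 : z.head? = some i0 :=
            hhead i0 (by simp) z ((PySem.Set.mem_ofList _ _).mp h)
          have : i = i0 := by rw [h1] at h2; exact Option.some.inj h2
          exact (List.nodup_cons.mp hnd).1 (this ▸ hi))]
    simp [List.flatMap_cons, List.append_assoc]

-- the canonical form both programs reduce to
theorem pv_A_canonical (target_cards : List Int) :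
    find_san_dai_yi target_cards =
      (((PySem.Set.ofList (PySem.List.sorted target_cards (fun x => x) false)).filter
          (fun i => decide (PySem.List.count (PySem.List.sorted target_cards (fun x => x) false) i ≥ 3))).flatMap
        (fun i => ((PySem.Set.ofList (PySem.List.sorted target_cards (fun x => x) false)).filter
            (fun w => decide (w ≠ i))).map (fun w => [i, i, i, w]))) := by
  simp only [find_san_dai_yi]
  generalize PySem.List.sorted target_cards (fun x => x) false = tc
  -- "three" is set(filter(count ≥ 3, tc)) in first-occurrence order
  have hthree :
      tc.foldl (fun acc i =>
        if PySem.List.count tc i ≥ 3 then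
          (if i ∈ acc then acc else acc ++ [i])
        else acc) [] =
      (PySem.Set.ofList tc).filter (fun i => decide (PySem.List.count tc i ≥ 3)) := by
    rw [PySem.List.foldl_ite_eq_foldl_filter (p := fun i => PySem.List.count tc i ≥ 3)
      (f := fun acc i => if i ∈ acc then acc else acc ++ [i])]
    have hadd : (fun (acc : List Int) (i : Int) => if i ∈ acc then acc else acc ++ [i]) =
        PySem.Set.add := by
      funext acc i; exact (PySem.Set.add_eq_ite acc i).symm
    rw [hadd, ← pv_ofList_filter]
    rfl
  rw [hthree]
  -- each iteration of the outer loop is a set-update with the block pvG tc i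
  have hbody : (fun (sds : List (List Int)) (i : Int) =>
      ((PySem.List.pyRange 0 3 1).foldl
          (fun t _ => (PySem.List.remove? t i).getD t) tc).foldl
        (fun sds yi =>
          if yi ≠ i then
            (if [i, i, i, yi] ∈ sds then sds else sds ++ [[i, i, i, yi]])
          else sds) sds) =
      (fun sds i => PySem.Set.update sds (pvG tc i)) := by
    funext sds i
    have h1 : (fun (sds : List (List Int)) (yi : Int) =>
        if yi ≠ i then
          (if [i, i, i, yi] ∈ sds then sds else sds ++ [[i, i, i, yi]])
        else sds) =
        (fun sds yi => if yi ≠ i then PySem.Set.add sds [i, i, i, yi] else sds) := by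
      funext sds yi
      by_cases h : yi ≠ i
      · rw [if_pos h, if_pos h, ← PySem.Set.add_eq_ite]
      · rw [if_neg h, if_neg h]
    show List.foldl (fun sds yi =>
        if yi ≠ i then
          (if [i, i, i, yi] ∈ sds then sds else sds ++ [[i, i, i, yi]])
        else sds) sds (pvRemove3 tc i) = PySem.Set.update sds (pvG tc i)
    rw [h1, PySem.List.foldl_ite_eq_foldl_filter]
    show _ = PySem.Set.update sds
      (((pvRemove3 tc i).filter (fun yi => decide (yi ≠ i))).map (fun yi => [i, i, i, yi]))
    rw [PySem.Set.update_map_eq_foldl_add]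
  rw [hbody]
  rw [pv_foldl_update (pvG tc)
    ((PySem.Set.ofList tc).filter (fun i => decide (PySem.List.count tc i ≥ 3))) []
    ((PySem.Set.nodup_ofList tc).filter _)
    (by
      intro i _ z hz
      simp only [pvG, List.mem_map] at hz
      obtain ⟨w, _, rfl⟩ := hz
      rfl)
    (by intro i _ z _ h; simp at h)]
  rw [List.nil_append]
  -- identify each deduplicated block with the canonical block
  have hblk : (fun i => PySem.Set.ofList (pvG tc i)) =
      (fun i => ((PySem.Set.ofList tc).filter (fun w => decide (w ≠ i))).map
        (fun w => [i, i, i, w])) := by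
    funext i
    have hinj : Function.Injective (fun w : Int => [i, i, i, w]) := by
      intro a b h; simpa using h
    rw [pvG, pv_ofList_map _ hinj, pv_remove3_filter, pv_ofList_filter]
  rw [hblk]

theorem pv_B_canonical (target_cards : List Int) :
    find_san_dai_yi_alt target_cards =
      (((PySem.Set.ofList (PySem.List.sorted target_cards (fun x => x) false)).filter
          (fun i => decide (PySem.List.count (PySem.List.sorted target_cards (fun x => x) false) i ≥ 3))).flatMap
        (fun i => ((PySem.Set.ofList (PySem.List.sorted target_cards (fun x => x) false)).filter
            (fun w => decide (w ≠ i))).map (fun w => [i, i, i, w]))) := by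
  simp only [find_san_dai_yi_alt]
  generalize PySem.List.sorted target_cards (fun x => x) false = tc
  rw [PySem.Dict.foldl_insert_getD_add_one_eq_counter, PySem.Dict.keys_counter]
  congr 1
  refine List.filter_congr (fun v _ => ?_)
  rw [PySem.Dict.getD_counter]
  apply decide_eq_decide.mpr
  constructor <;> intro h <;> [exact_mod_cast h; exact_mod_cast h]

-- ===== VERDICT (by name: the statement is the Claim_ definition above) =====
theorem find_san_dai_yi_spec : Claim_equal_find_san_dai_yi := by
  intro target_cards _
  unfold Spec_find_san_dai_yi
  rw [pv_A_canonical, pv_B_canonical]
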